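-- pv_equiv track=rewrite | github.com/amapyon/pg_26_python | src/daiji.py | to_daiji
-- ===== SOURCE A (Python) =====
-- num1s = ['', u'壱', u'弐', u'参', u'肆', u'伍', u'陸', u'漆', u'捌', u'玖']
--
-- num2s = ['', '', u'弐', u'参', u'肆', u'伍', u'陸', u'漆',u'捌', u'玖']
--
-- digits = ['', u'拾', u'佰', u'仟']
--
-- def to_daiji(number):
--     '''数値を大字に変換する'''
--
--     if (number < 0 or 9999 <number):
--         raise ValueError(u'範囲外です')
--
--     if (number == 0):
--         return u'零'
--
--     daiji = ''
--     for digit in range(3, 0, -1):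
--         num = int(number / pow(10, digit))
--         daiji += num2s[num]
--         if (num != 0):
--             daiji += digits[digit]
--         number = number % pow(10, digit)
--
--     daiji += num1s[number]
--     return daiji
-- ===== SOURCE B (Python) =====
-- num1s = ['', '壱', '弐', '参', '肆', '伍', '陸', '漆', '捌', '玖']
--
-- UNITS = [(1000, '仟'), (100, '佰'), (10, '拾')]
--
-- def to_daiji(number):
--     '''数値を大字に変換する'''
--     if number < 0 or 9999 < number:
--         raise ValueError('範囲外です')
--     if number == 0:
--         return '零'
--     # Recursive descent over (base, marker) pairs; one digit table only:
--     # for the high places a digit of 1 is rendered as the bare marker.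
--     def go(n, units):
--         if not units:
--             return num1s[n]
--         (base, marker), rest = units[0], units[1:]
--         d, r = divmod(n, base)
--         head = ('' if d <= 1 else num1s[d]) + (marker if d != 0 else '')
--         return head + go(r, rest)
--     return go(number, UNITS)
-- ===== Notes on version B (the rewrite author's own statement) =====
-- stated objective: alternative
-- what changed: B drops the num2s and digits tables and A's destructive loop entirely: it recurses over a data list of (base, marker) pairs, rendering each high place from the single num1s table with an explicit 'digit 1 gives a bare marker' suppression rule instead of a second lookup table.
import Mathlib
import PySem

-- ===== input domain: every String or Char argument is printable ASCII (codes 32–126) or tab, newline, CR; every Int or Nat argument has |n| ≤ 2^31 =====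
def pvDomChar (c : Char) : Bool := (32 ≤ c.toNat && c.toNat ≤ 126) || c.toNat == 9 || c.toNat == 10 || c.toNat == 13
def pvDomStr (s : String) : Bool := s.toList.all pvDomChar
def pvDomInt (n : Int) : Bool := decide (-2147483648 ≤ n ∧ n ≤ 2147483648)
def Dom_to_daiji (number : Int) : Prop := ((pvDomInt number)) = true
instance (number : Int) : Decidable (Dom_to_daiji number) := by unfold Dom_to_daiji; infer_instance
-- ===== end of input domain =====

-- B drops A's num2s/digits tables and destructive loop: it recurses over a data list of
-- (base, marker) pairs using the single num1s table, suppressing digit 1 on the high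
-- places (objective: alternative).

-- ===== PORT A =====
def num1s : List String := ["", "壱", "弐", "参", "肆", "伍", "陸", "漆", "捌", "玖"]
def num2s : List String := ["", "", "弐", "参", "肆", "伍", "陸", "漆", "捌", "玖"]
def digitsL : List String := ["", "拾", "佰", "仟"]

-- 'int(number / pow(10, digit))' is float division then truncation toward zero; for the
-- admitted 0 ≤ number ≤ 9999 this is exact and equals floor division, ported as PySem.Int.floordiv.
def to_daiji (number : Int) : String :=
  if number < 0 ∨ 9999 < number then ""  -- Python raises ValueError here; excluded by Pre_
  else if number = 0 then "零"
  else
    let st := (PySem.List.pyRange 3 0 (-1)).foldl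
      (fun (st : String × Int) (digit : Int) =>
        let num := PySem.Int.floordiv st.2 ((10 : Int) ^ digit.toNat)
        let daiji := st.1 ++ PySem.List.pyGetD num2s num ""
        let daiji := if num ≠ 0 then daiji ++ PySem.List.pyGetD digitsL digit "" else daiji
        (daiji, PySem.Int.mod st.2 ((10 : Int) ^ digit.toNat)))
      ("", number)
    st.1 ++ PySem.List.pyGetD num1s st.2 ""

-- ===== PORT B =====
def unitsB : List (Int × String) := [(1000, "仟"), (100, "佰"), (10, "拾")]

def goB : Int → List (Int × String) → String
  | n, [] => PySem.List.pyGetD num1s n ""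
  | n, (base, marker) :: rest =>
      let d := PySem.Int.floordiv n base
      let r := PySem.Int.mod n base
      let head := (if d ≤ 1 then "" else PySem.List.pyGetD num1s d "") ++
                  (if d ≠ 0 then marker else "")
      head ++ goB r rest

def to_daiji_alt (number : Int) : String :=
  if number < 0 ∨ 9999 < number then ""  -- Python raises ValueError here; excluded by Pre_
  else if number = 0 then "零"
  else goB number unitsB

-- ===== PRECONDITION & SPEC =====
-- A raises ValueError exactly when number < 0 or number > 9999; those inputs are excluded.
def Pre_to_daiji (number : Int) : Prop := 0 ≤ number ∧ number ≤ 9999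
instance (number : Int) : Decidable (Pre_to_daiji number) := by unfold Pre_to_daiji; infer_instance
def pvWitness_to_daiji : Int := (2026)

def Spec_to_daiji (number : Int) (out : String) : Prop := out = to_daiji_alt number
instance (number : Int) (out : String) : Decidable (Spec_to_daiji number out) := by unfold Spec_to_daiji; infer_instance

-- ===== CLAIM (what is proved, stated in full; the proofs are below) =====
def Claim_equal_to_daiji : Prop := ∀ (number : Int), Dom_to_daiji number → Pre_to_daiji number → Spec_to_daiji number (to_daiji number)

-- ===== LEMMAS AND PROOFS =====
-- A's num2s lookup equals B's suppression rule over the single num1s table (digits 0..9).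
theorem num2_eq_suppressed (q : Int) (h0 : 0 ≤ q) (h9 : q ≤ 9) :
    PySem.List.pyGetD num2s q "" = (if q ≤ 1 then "" else PySem.List.pyGetD num1s q "") := by
  interval_cases q <;> rfl

-- Main lemma: on positive admitted inputs both ports assemble the same string.
theorem to_daiji_eq_alt_of_pos (n : Int) (h0 : 0 < n) (h1 : n ≤ 9999) :
    to_daiji n = to_daiji_alt n := by
  have hr : PySem.List.pyRange 3 0 (-1) = [3, 2, 1] := by decide
  unfold to_daiji to_daiji_alt goB unitsB
  rw [if_neg (by omega), if_neg (by omega), if_neg (by omega), if_neg (by omega), hr]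
  simp only [List.foldl, goB]
  simp only [show Int.toNat 3 = 3 from rfl, show Int.toNat 2 = 2 from rfl, show Int.toNat 1 = 1 from rfl,
    show ((10:Int)^3) = 1000 from by norm_num, show ((10:Int)^2) = 100 from by norm_num, show ((10:Int)^1) = 10 from by norm_num]
  simp only [PySem.Int.floordiv_eq_ediv_of_pos (show (0:Int) < 10 by norm_num),
    PySem.Int.floordiv_eq_ediv_of_pos (show (0:Int) < 100 by norm_num),
    PySem.Int.floordiv_eq_ediv_of_pos (show (0:Int) < 1000 by norm_num),
    PySem.Int.mod_eq_emod_of_pos (show (0:Int) < 10 by norm_num),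
    PySem.Int.mod_eq_emod_of_pos (show (0:Int) < 100 by norm_num),
    PySem.Int.mod_eq_emod_of_pos (show (0:Int) < 1000 by norm_num)]
  rw [num2_eq_suppressed (n / 1000) (by omega) (by omega),
      num2_eq_suppressed (n % 1000 / 100) (by omega) (by omega),
      num2_eq_suppressed (n % 1000 % 100 / 10) (by omega) (by omega)]
  generalize (if (n / 1000) ≤ 1 then "" else PySem.List.pyGetD num1s (n / 1000) "") = x3
  generalize (if (n % 1000 / 100) ≤ 1 then "" else PySem.List.pyGetD num1s (n % 1000 / 100) "") = x2
  generalize (if (n % 1000 % 100 / 10) ≤ 1 then "" else PySem.List.pyGetD num1s (n % 1000 % 100 / 10) "") = x1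
  generalize PySem.List.pyGetD num1s (n % 1000 % 100 % 10) "" = x0
  split_ifs <;> (rw [← String.toList_inj] ; simp [String.toList_append, digitsL, PySem.List.pyGetD, PySem.List.pyGet?, PySem.List.pyIdx?])

-- ===== VERDICT (by name: the statement is the Claim_ definition above) =====
theorem to_daiji_spec : Claim_equal_to_daiji := by
  intro n _ hp
  obtain ⟨h0, h1⟩ := hp
  unfold Spec_to_daiji
  rcases eq_or_lt_of_le h0 with hz | hpos
  · subst hz; rfl
  · exact to_daiji_eq_alt_of_pos n hpos h1
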